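-- pv_equiv track=rewrite | github.com/Aggrron/KURSCH | Chess.py | sm_is_on_th_way_rook
-- ===== SOURCE A (Python) =====
-- def sm_is_on_th_way_rook(nsi, asi, states):
--     y_st = nsi[0]
--     x_st = nsi[1]
--     y_en = asi[0]
--     x_en = asi[1]
--     da_way_is_blocked = False
--     if nsi[0] == asi[0]:
--         if x_st+1 < x_en:
--             for i in range(x_st+1, x_en):
--                 if states[y_st][i] != 'None':
--                     da_way_is_blocked = True
--         if x_st-1 > x_en:
--             for i in range(x_en+1, x_st):
--                 if states[y_st][i] != 'None':
--                     da_way_is_blocked = True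
--     if nsi[1] == asi[1]:
--         if y_st-1 > y_en:
--             for i in range(y_en+1, y_st):
--                 if states[i][x_st] != 'None':
--                     da_way_is_blocked = True
--         if y_st+1 < y_en:
--             for i in range(y_st+1, y_en):
--                 if states[i][x_st] != 'None':
--                     da_way_is_blocked = True
--     return da_way_is_blocked
-- ===== SOURCE B (Python) =====
-- def sm_is_on_th_way_rook(nsi, asi, states):
--     dy = asi[0] - nsi[0]
--     dx = asi[1] - nsi[1]
--     if dy != 0 and dx != 0:
--         return False
--     n = abs(dy + dx) - 1          # number of squares strictly between the two
--     sy = (dy > 0) - (dy < 0)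
--     sx = (dx > 0) - (dx < 0)
--
--     def blocked(lo, cnt):
--         # divide and conquer over interior squares nsi + s*lo .. nsi + s*(lo+cnt-1)
--         if cnt <= 0:
--             return False
--         if cnt == 1:
--             return states[nsi[0] + sy * lo][nsi[1] + sx * lo] != 'None'
--         m = cnt // 2
--         return blocked(lo, m) or blocked(lo + m, cnt - m)
--
--     return blocked(1, n)
-- ===== Notes on version B (the rewrite author's own statement) =====
-- stated objective: alternative
-- what changed: Replaces the four directional range() loops with a mutable flag by a unit direction vector (sy,sx) plus a recursive divide-and-conquer over the interior segment (blocked = blocked(left half) or blocked(right half)), with no range scan and no accumulator.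
import Mathlib
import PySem

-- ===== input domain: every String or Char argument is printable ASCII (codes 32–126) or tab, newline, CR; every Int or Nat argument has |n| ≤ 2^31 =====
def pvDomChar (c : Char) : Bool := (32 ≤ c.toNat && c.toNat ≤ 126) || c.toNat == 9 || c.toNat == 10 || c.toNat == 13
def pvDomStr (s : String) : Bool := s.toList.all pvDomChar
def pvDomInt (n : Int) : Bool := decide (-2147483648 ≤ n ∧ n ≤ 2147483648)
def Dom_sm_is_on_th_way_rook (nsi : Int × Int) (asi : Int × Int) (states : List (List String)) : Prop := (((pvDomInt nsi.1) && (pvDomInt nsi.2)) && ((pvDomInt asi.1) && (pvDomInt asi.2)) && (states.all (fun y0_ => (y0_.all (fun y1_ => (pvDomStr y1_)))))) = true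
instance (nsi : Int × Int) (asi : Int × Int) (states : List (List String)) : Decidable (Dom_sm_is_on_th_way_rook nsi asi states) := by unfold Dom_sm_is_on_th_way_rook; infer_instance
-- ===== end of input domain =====

-- B replaces A's four directional range loops with a mutable flag by a unit direction
-- vector plus a recursive divide-and-conquer over the interior segment (alternative
-- decomposition, same cost). Equivalence of the RETURN value on Pre_ (all board
-- accesses in range, Python negative wraparound included).

-- `states[y][i]` (Python indexing, negative wraparound). Totalised with defaults;
-- Pre_ excludes exactly the inputs where the Python access raises IndexError.
def pvCell (states : List (List String)) (y i : Int) : String :=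
  (PySem.List.pyGet? ((PySem.List.pyGet? states y).getD []) i).getD "None"

-- ===== PORT A =====
def sm_is_on_th_way_rook (nsi : Int × Int) (asi : Int × Int) (states : List (List String)) : Bool :=
  let y_st := nsi.1
  let x_st := nsi.2
  let y_en := asi.1
  let x_en := asi.2
  let b0 : Bool := false
  let b1 : Bool :=
    if nsi.1 = asi.1 then
      let b := if x_st + 1 < x_en then
          (PySem.List.pyRange (x_st + 1) x_en 1).foldl
            (fun b i => if pvCell states y_st i ≠ "None" then true else b) b0
        else b0
      if x_st - 1 > x_en then
          (PySem.List.pyRange (x_en + 1) x_st 1).foldl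
            (fun b i => if pvCell states y_st i ≠ "None" then true else b) b
      else b
    else b0
  if nsi.2 = asi.2 then
    let b := if y_st - 1 > y_en then
        (PySem.List.pyRange (y_en + 1) y_st 1).foldl
          (fun b i => if pvCell states i x_st ≠ "None" then true else b) b1
      else b1
    if y_st + 1 < y_en then
        (PySem.List.pyRange (y_st + 1) y_en 1).foldl
          (fun b i => if pvCell states i x_st ≠ "None" then true else b) b
    else b
  else b1

-- ===== PORT B =====
-- Source B's inner `blocked(lo, cnt)`: divide and conquer over the interior squares.
def pvBlocked (states : List (List String)) (y0 x0 sy sx : Int) (lo cnt : Int) : Bool :=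
  if cnt ≤ 0 then false
  else if cnt = 1 then pvCell states (y0 + sy * lo) (x0 + sx * lo) ≠ "None"
  else
    let m := PySem.Int.floordiv cnt 2
    pvBlocked states y0 x0 sy sx lo m || pvBlocked states y0 x0 sy sx (lo + m) (cnt - m)
termination_by cnt.toNat
decreasing_by
  all_goals (simp only [PySem.Int.floordiv]; rw [Int.fdiv_eq_ediv]; omega)

def sm_is_on_th_way_rook_alt (nsi : Int × Int) (asi : Int × Int) (states : List (List String)) : Bool :=
  let dy := asi.1 - nsi.1
  let dx := asi.2 - nsi.2
  if dy ≠ 0 ∧ dx ≠ 0 then false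
  else
    let n := |dy + dx| - 1
    let sy := (if dy > 0 then (1 : Int) else 0) - (if dy < 0 then 1 else 0)
    let sx := (if dx > 0 then (1 : Int) else 0) - (if dx < 0 then 1 else 0)
    pvBlocked states nsi.1 nsi.2 sy sx 1 n

-- ===== PRECONDITION & SPEC =====
-- length of the row of `states` that Python's states[y] selects (0 if y is out of range)
def pvRowLen (states : List (List String)) (y : Int) : Int :=
  (((PySem.List.pyGet? states y).getD []).length : Int)

-- Pre_ excludes exactly the inputs on which Python A raises IndexError: whenever a scan
-- between the two squares is nonempty, every index it touches (Python negative
-- wraparound included) must be in range.  Stated with interval bounds, not per-index.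
def Pre_sm_is_on_th_way_rook (nsi : Int × Int) (asi : Int × Int) (states : List (List String)) : Prop :=
  (nsi.1 = asi.1 → min nsi.2 asi.2 + 1 < max nsi.2 asi.2 →
    (-(states.length : Int) ≤ nsi.1 ∧ nsi.1 < (states.length : Int)) ∧
    -(pvRowLen states nsi.1) ≤ min nsi.2 asi.2 + 1 ∧ max nsi.2 asi.2 ≤ pvRowLen states nsi.1) ∧
  (nsi.2 = asi.2 → min nsi.1 asi.1 + 1 < max nsi.1 asi.1 →
    (-(states.length : Int) ≤ min nsi.1 asi.1 + 1 ∧ max nsi.1 asi.1 ≤ (states.length : Int)) ∧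
    ∀ k ∈ List.range states.length,
      ((min nsi.1 asi.1 < (k : Int) ∧ (k : Int) < max nsi.1 asi.1) ∨
       (min nsi.1 asi.1 < (k : Int) - (states.length : Int) ∧
        (k : Int) - (states.length : Int) < max nsi.1 asi.1)) →
      -(((states.getD k []).length : Int)) ≤ nsi.2 ∧ nsi.2 < ((states.getD k []).length : Int))

instance (nsi : Int × Int) (asi : Int × Int) (states : List (List String)) :
    Decidable (Pre_sm_is_on_th_way_rook nsi asi states) := by
  unfold Pre_sm_is_on_th_way_rook; infer_instance

def pvWitness_sm_is_on_th_way_rook : (Int × Int) × (Int × Int) × List (List String) :=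
  ((0, 0), (0, 3), [["r", "None", "p", "None"], ["None", "None", "None", "None"]])

def Spec_sm_is_on_th_way_rook (nsi : Int × Int) (asi : Int × Int) (states : List (List String)) (out : Bool) : Prop := out = sm_is_on_th_way_rook_alt nsi asi states
instance (nsi : Int × Int) (asi : Int × Int) (states : List (List String)) (out : Bool) : Decidable (Spec_sm_is_on_th_way_rook nsi asi states out) := by unfold Spec_sm_is_on_th_way_rook; infer_instance

-- ===== CLAIM (what is proved, stated in full; the proofs are below) =====
def Claim_equal_sm_is_on_th_way_rook : Prop := ∀ (nsi : Int × Int) (asi : Int × Int) (states : List (List String)), Dom_sm_is_on_th_way_rook nsi asi states → Pre_sm_is_on_th_way_rook nsi asi states → Spec_sm_is_on_th_way_rook nsi asi states (sm_is_on_th_way_rook nsi asi states)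

-- ===== LEMMAS AND PROOFS =====

-- A's for-loop with the mutable flag is an or-accumulation: foldl = b || any.
theorem pv_foldl_if_any (Q : Int → Prop) [DecidablePred Q] (l : List Int) (b : Bool) :
    l.foldl (fun b i => if Q i then true else b) b = (b || l.any fun i => decide (Q i)) := by
  induction l generalizing b with
  | nil => simp
  | cons x xs ih =>
    rw [List.foldl_cons, List.any_cons]
    by_cases h : Q x
    · rw [if_pos h, ih, decide_eq_true h]
      simp
    · rw [if_neg h, ih, decide_eq_false h]
      simp

-- B's divide-and-conquer reports exactly: some interior index k in [lo, lo+cnt) is occupied.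
theorem pvBlocked_nonpos (states : List (List String)) (y0 x0 sy sx lo cnt : Int)
    (h : cnt ≤ 0) : pvBlocked states y0 x0 sy sx lo cnt = false := by
  rw [pvBlocked]; simp [h]

theorem pvBlocked_iff_aux (states : List (List String)) (y0 x0 sy sx : Int) :
    ∀ n : Nat, ∀ lo cnt : Int, cnt.toNat = n →
    (pvBlocked states y0 x0 sy sx lo cnt = true ↔
      ∃ k : Int, lo ≤ k ∧ k < lo + cnt ∧ pvCell states (y0 + sy * k) (x0 + sx * k) ≠ "None") := by
  intro n
  induction n using Nat.strong_induction_on with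
  | _ n ih =>
    intro lo cnt hn
    rw [pvBlocked]
    by_cases h0 : cnt ≤ 0
    · simp only [if_pos h0, Bool.false_eq_true, false_iff]
      rintro ⟨k, h1, h2, _⟩; omega
    · rw [if_neg h0]
      by_cases h1 : cnt = 1
      · rw [if_pos h1]
        simp only [decide_eq_true_iff]
        constructor
        · intro h; exact ⟨lo, le_refl _, by omega, h⟩
        · rintro ⟨k, hk1, hk2, hk3⟩
          have : k = lo := by omega
          subst this; exact hk3
      · rw [if_neg h1]
        have hfd : PySem.Int.floordiv cnt 2 = cnt / 2 := by
          simp only [PySem.Int.floordiv]; rw [Int.fdiv_eq_ediv]; simp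
        have hm1 : 1 ≤ cnt / 2 := by omega
        have hm2 : cnt / 2 < cnt := by omega
        rw [Bool.or_eq_true,
          ih (PySem.Int.floordiv cnt 2).toNat (by rw [hfd]; omega) _ _ rfl,
          ih (cnt - PySem.Int.floordiv cnt 2).toNat (by rw [hfd]; omega) _ _ rfl]
        rw [hfd]
        constructor
        · rintro (⟨k, a1, a2, a3⟩ | ⟨k, a1, a2, a3⟩)
          · exact ⟨k, a1, by omega, a3⟩
          · exact ⟨k, by omega, by omega, a3⟩
        · rintro ⟨k, a1, a2, a3⟩
          by_cases hk : k < lo + cnt / 2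
          · exact Or.inl ⟨k, a1, hk, a3⟩
          · exact Or.inr ⟨k, by omega, by omega, a3⟩

theorem pvBlocked_iff (states : List (List String)) (y0 x0 sy sx lo cnt : Int) :
    pvBlocked states y0 x0 sy sx lo cnt = true ↔
    ∃ k : Int, lo ≤ k ∧ k < lo + cnt ∧ pvCell states (y0 + sy * k) (x0 + sx * k) ≠ "None" :=
  pvBlocked_iff_aux states y0 x0 sy sx cnt.toNat lo cnt rfl

-- ===== VERDICT (by name: the statement is the Claim_ definition above) =====
theorem sm_is_on_th_way_rook_spec : Claim_equal_sm_is_on_th_way_rook := by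
  unfold Claim_equal_sm_is_on_th_way_rook
  intro nsi asi states _ _
  unfold Spec_sm_is_on_th_way_rook sm_is_on_th_way_rook sm_is_on_th_way_rook_alt
  obtain ⟨y_st, x_st⟩ := nsi
  obtain ⟨y_en, x_en⟩ := asi
  simp only [pv_foldl_if_any, Bool.false_or]
  by_cases hy : y_st = y_en <;> by_cases hx : x_st = x_en
  · -- same square
    subst hy; subst hx
    have h1 : ¬ (y_st + 1 < y_st) := by omega
    have h2 : ¬ (y_st - 1 > y_st) := by omega
    have h3 : ¬ (x_st + 1 < x_st) := by omega
    have h4 : ¬ (x_st - 1 > x_st) := by omega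
    simp [h1, h2, h3, h4, pvBlocked_nonpos]
  · -- same row, different column
    subst hy
    simp only [sub_self]
    have hA1 : ¬ (y_st + 1 < y_st) := by omega
    have hA2 : ¬ (y_st - 1 > y_st) := by omega
    rw [if_neg hx, if_pos trivial, if_neg (by simp : ¬((0:Int) ≠ 0 ∧ x_en - x_st ≠ 0))]
    rcases lt_trichotomy x_st x_en with hlt | heq | hgt
    · -- scan to the right
      have hsx : ((if x_en - x_st > 0 then (1:Int) else 0) - if x_en - x_st < 0 then 1 else 0) = 1 := by
        rw [if_pos (by omega), if_neg (by omega)]; norm_num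
      have habs : |(0:Int) + (x_en - x_st)| - 1 = x_en - x_st - 1 := by
        rw [zero_add, abs_of_pos (by omega)]
      rw [hsx, habs, if_neg (by omega : ¬ x_st - 1 > x_en)]
      by_cases hf : x_st + 1 < x_en
      · rw [if_pos hf, Bool.eq_iff_iff, List.any_eq_true, pvBlocked_iff]
        simp only [decide_eq_true_eq]
        constructor
        · rintro ⟨i, hi, hp⟩
          rw [PySem.List.mem_pyRange_one] at hi
          refine ⟨i - x_st, by omega, by omega, ?_⟩
          have e1 : y_st + 0 * (i - x_st) = y_st := by ring
          have e2 : x_st + 1 * (i - x_st) = i := by ring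
          rw [e1, e2]; exact hp
        · rintro ⟨k, hk1, hk2, hp⟩
          refine ⟨x_st + k, ?_, ?_⟩
          · rw [PySem.List.mem_pyRange_one]; omega
          · have e1 : y_st + 0 * k = y_st := by ring
            have e2 : x_st + 1 * k = x_st + k := by ring
            rw [e1, e2] at hp; exact hp
      · rw [if_neg hf, pvBlocked_nonpos _ _ _ _ _ _ _ (by omega)]
    · exact absurd heq hx
    · -- scan to the left
      have hsx : ((if x_en - x_st > 0 then (1:Int) else 0) - if x_en - x_st < 0 then 1 else 0) = 0 - 1 := by
        rw [if_neg (by omega), if_pos (by omega)]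
      have habs : |(0:Int) + (x_en - x_st)| - 1 = x_st - x_en - 1 := by
        rw [zero_add, abs_of_neg (by omega)]; ring
      have hf : ¬ x_st + 1 < x_en := by omega
      rw [hsx, habs]
      simp only [if_neg hf, Bool.false_or]
      by_cases hb : x_st - 1 > x_en
      · rw [if_pos hb, Bool.eq_iff_iff, List.any_eq_true, pvBlocked_iff]
        simp only [decide_eq_true_eq]
        constructor
        · rintro ⟨i, hi, hp⟩
          rw [PySem.List.mem_pyRange_one] at hi
          refine ⟨x_st - i, by omega, by omega, ?_⟩
          have e1 : y_st + 0 * (x_st - i) = y_st := by ring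
          have e2 : x_st + (0 - 1) * (x_st - i) = i := by ring
          rw [e1, e2]; exact hp
        · rintro ⟨k, hk1, hk2, hp⟩
          refine ⟨x_st - k, ?_, ?_⟩
          · rw [PySem.List.mem_pyRange_one]; omega
          · have e1 : y_st + 0 * k = y_st := by ring
            have e2 : x_st + (0 - 1) * k = x_st - k := by ring
            rw [e1, e2] at hp; exact hp
      · rw [if_neg hb, pvBlocked_nonpos _ _ _ _ _ _ _ (by omega)]
  · -- same column, different row
    subst hx
    simp only [sub_self]
    rw [if_pos trivial, if_neg (by simp : ¬(y_en - y_st ≠ 0 ∧ (0:Int) ≠ 0))]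
    simp only [if_neg hy, Bool.false_or]
    rcases lt_trichotomy y_st y_en with hlt | heq | hgt
    · -- scan downward (increasing row index)
      have hsy : ((if y_en - y_st > 0 then (1:Int) else 0) - if y_en - y_st < 0 then 1 else 0) = 1 := by
        rw [if_pos (by omega), if_neg (by omega)]; norm_num
      have habs : |y_en - y_st + (0:Int)| - 1 = y_en - y_st - 1 := by
        rw [add_zero, abs_of_pos (by omega)]
      have hb : ¬ y_st - 1 > y_en := by omega
      rw [hsy, habs]
      simp only [if_neg hb, Bool.false_or]
      by_cases hf : y_st + 1 < y_en
      · rw [if_pos hf, Bool.eq_iff_iff, List.any_eq_true, pvBlocked_iff]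
        simp only [decide_eq_true_eq]
        constructor
        · rintro ⟨i, hi, hp⟩
          rw [PySem.List.mem_pyRange_one] at hi
          refine ⟨i - y_st, by omega, by omega, ?_⟩
          have e1 : y_st + 1 * (i - y_st) = i := by ring
          have e2 : x_st + 0 * (i - y_st) = x_st := by ring
          rw [e1, e2]; exact hp
        · rintro ⟨k, hk1, hk2, hp⟩
          refine ⟨y_st + k, ?_, ?_⟩
          · rw [PySem.List.mem_pyRange_one]; omega
          · have e1 : y_st + 1 * k = y_st + k := by ring
            have e2 : x_st + 0 * k = x_st := by ring
            rw [e1, e2] at hp; exact hp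
      · rw [if_neg hf, pvBlocked_nonpos _ _ _ _ _ _ _ (by omega)]
    · exact absurd heq hy
    · -- scan upward (decreasing row index)
      have hsy : ((if y_en - y_st > 0 then (1:Int) else 0) - if y_en - y_st < 0 then 1 else 0) = 0 - 1 := by
        rw [if_neg (by omega), if_pos (by omega)]
      have habs : |y_en - y_st + (0:Int)| - 1 = y_st - y_en - 1 := by
        rw [add_zero, abs_of_neg (by omega)]; ring
      have hf : ¬ y_st + 1 < y_en := by omega
      rw [hsy, habs]
      simp only [if_neg hf]
      by_cases hb : y_st - 1 > y_en
      · rw [if_pos hb, Bool.eq_iff_iff, List.any_eq_true, pvBlocked_iff]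
        simp only [decide_eq_true_eq]
        constructor
        · rintro ⟨i, hi, hp⟩
          rw [PySem.List.mem_pyRange_one] at hi
          refine ⟨y_st - i, by omega, by omega, ?_⟩
          have e1 : y_st + (0 - 1) * (y_st - i) = i := by ring
          have e2 : x_st + 0 * (y_st - i) = x_st := by ring
          rw [e1, e2]; exact hp
        · rintro ⟨k, hk1, hk2, hp⟩
          refine ⟨y_st - k, ?_, ?_⟩
          · rw [PySem.List.mem_pyRange_one]; omega
          · have e1 : y_st + (0 - 1) * k = y_st - k := by ring
            have e2 : x_st + 0 * k = x_st := by ring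
            rw [e1, e2] at hp; exact hp
      · rw [if_neg hb, pvBlocked_nonpos _ _ _ _ _ _ _ (by omega)]
  · -- neither row nor column shared: both return false
    have d1 : y_en - y_st ≠ 0 := by omega
    have d2 : x_en - x_st ≠ 0 := by omega
    simp [hx, hy, d1, d2]
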